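-- pv_equiv track=rewrite | github.com/jefallon/adventofcode2020 | Day12b.py | move_waypoint
-- ===== SOURCE A (Python) =====
-- def move_waypoint(wp, action, dist):
--     waypoint = wp
--     if action == 'N':
--         waypoint[1] += dist
--     elif action == 'S':
--         waypoint[1] -= dist
--     elif action == 'W':
--         waypoint[0] -= dist
--     elif action == 'E':
--         waypoint[0] += dist
--     elif action == 'L':
--         for i in range(dist//90):
--             waypoint = [-waypoint[1], waypoint[0]]
--     elif action == 'R':
--         for i in range(dist//90):
--             waypoint = [waypoint[1], -waypoint[0]]
--     return waypoint
-- ===== SOURCE B (Python) =====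
-- def move_waypoint(wp, action, dist):
--     # Translations mutate wp in place exactly like A; rotations use a closed
--     # form on dist//90 mod 4 instead of A's repeated 90-degree loop.
--     if action in ('N', 'S'):
--         wp[1] += dist if action == 'N' else -dist
--     elif action in ('W', 'E'):
--         wp[0] += dist if action == 'E' else -dist
--     elif action in ('L', 'R'):
--         n = dist // 90
--         if n >= 1:
--             x, y = wp[0], wp[1]
--             m = n % 4 if action == 'L' else -(n % 4) % 4
--             if m == 1:
--                 return [-y, x]
--             if m == 2:
--                 return [-x, -y]
--             if m == 3:
--                 return [y, -x]
--             return [x, y]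
--     return wp
-- ===== Notes on version B (the rewrite author's own statement) =====
-- stated objective: simpler
-- what changed: Rotations compute dist//90 mod 4 once and pick the rotated coordinates from a four-case closed form instead of A's loop that rotates the waypoint 90 degrees dist//90 times; translations stay in-place mutations as in A.
import Mathlib
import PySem

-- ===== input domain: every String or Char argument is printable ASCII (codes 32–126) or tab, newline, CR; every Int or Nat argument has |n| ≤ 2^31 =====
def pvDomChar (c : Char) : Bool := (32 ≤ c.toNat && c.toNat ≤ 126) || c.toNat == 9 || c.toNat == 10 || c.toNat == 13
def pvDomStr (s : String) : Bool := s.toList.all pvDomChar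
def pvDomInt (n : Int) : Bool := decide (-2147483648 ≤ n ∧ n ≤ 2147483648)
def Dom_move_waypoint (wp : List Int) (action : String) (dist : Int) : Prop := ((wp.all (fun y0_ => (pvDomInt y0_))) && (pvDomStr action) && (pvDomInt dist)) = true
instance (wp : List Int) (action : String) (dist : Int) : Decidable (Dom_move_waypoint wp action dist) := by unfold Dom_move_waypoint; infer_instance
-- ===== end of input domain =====

-- B replaces A's repeated-90°-rotation loop by a closed form on (dist//90) mod 4;
-- equivalence is about the RETURN value (both Pythons also mutate wp identically for N/S/E/W).

-- ===== PORT A =====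
def move_waypoint (wp : List Int) (action : String) (dist : Int) : List Int :=
  if action == "N" then
    PySem.List.pySetD wp 1 (PySem.List.pyGetD wp 1 0 + dist)
  else if action == "S" then
    PySem.List.pySetD wp 1 (PySem.List.pyGetD wp 1 0 - dist)
  else if action == "W" then
    PySem.List.pySetD wp 0 (PySem.List.pyGetD wp 0 0 - dist)
  else if action == "E" then
    PySem.List.pySetD wp 0 (PySem.List.pyGetD wp 0 0 + dist)
  else if action == "L" then
    (PySem.List.pyRange 0 (PySem.Int.floordiv dist 90) 1).foldl
      (fun w _ => [-(PySem.List.pyGetD w 1 0), PySem.List.pyGetD w 0 0]) wp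
  else if action == "R" then
    (PySem.List.pyRange 0 (PySem.Int.floordiv dist 90) 1).foldl
      (fun w _ => [PySem.List.pyGetD w 1 0, -(PySem.List.pyGetD w 0 0)]) wp
  else wp

-- ===== PORT B =====
def move_waypoint_alt (wp : List Int) (action : String) (dist : Int) : List Int :=
  if action == "N" || action == "S" then
    PySem.List.pySetD wp 1 (PySem.List.pyGetD wp 1 0 + (if action == "N" then dist else -dist))
  else if action == "W" || action == "E" then
    PySem.List.pySetD wp 0 (PySem.List.pyGetD wp 0 0 + (if action == "E" then dist else -dist))
  else if action == "L" || action == "R" then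
    let n := PySem.Int.floordiv dist 90
    if 1 ≤ n then
      let x := PySem.List.pyGetD wp 0 0
      let y := PySem.List.pyGetD wp 1 0
      let m := if action == "L" then PySem.Int.mod n 4 else PySem.Int.mod (-(PySem.Int.mod n 4)) 4
      if m == 1 then [-y, x]
      else if m == 2 then [-x, -y]
      else if m == 3 then [y, -x]
      else [x, y]
    else wp
  else wp

-- ===== PRECONDITION & SPEC =====
-- Pre_ excludes exactly the inputs on which A raises IndexError: a waypoint list too
-- short for the coordinates the action reads/writes (index 1 for N/S and for any
-- effective rotation, index 0 for W/E).
def Pre_move_waypoint (wp : List Int) (action : String) (dist : Int) : Prop :=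
  ((action = "N" ∨ action = "S") → 2 ≤ wp.length) ∧
  ((action = "W" ∨ action = "E") → 1 ≤ wp.length) ∧
  ((action = "L" ∨ action = "R") → 90 ≤ dist → 2 ≤ wp.length)
instance (wp : List Int) (action : String) (dist : Int) : Decidable (Pre_move_waypoint wp action dist) := by unfold Pre_move_waypoint; infer_instance

def pvWitness_move_waypoint : List Int × String × Int := ([10, 4], "R", 180)

def Spec_move_waypoint (wp : List Int) (action : String) (dist : Int) (out : List Int) : Prop := out = move_waypoint_alt wp action dist
instance (wp : List Int) (action : String) (dist : Int) (out : List Int) : Decidable (Spec_move_waypoint wp action dist out) := by unfold Spec_move_waypoint; infer_instance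

-- ===== CLAIM (what is proved, stated in full; the proofs are below) =====
def Claim_equal_move_waypoint : Prop := ∀ (wp : List Int) (action : String) (dist : Int), Dom_move_waypoint wp action dist → Pre_move_waypoint wp action dist → Spec_move_waypoint wp action dist (move_waypoint wp action dist)

-- ===== LEMMAS AND PROOFS =====

-- a fold whose step ignores the list element is an iterate
theorem foldl_const_iterate {α β : Type} (f : α → α) (l : List β) (init : α) :
    l.foldl (fun w _ => f w) init = f^[l.length] init := by
  induction l generalizing init with
  | nil => rfl
  | cons h t ih => simp [List.foldl, ih, Function.iterate_succ_apply]

def rotL (w : List Int) : List Int := [-(PySem.List.pyGetD w 1 0), PySem.List.pyGetD w 0 0]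
def rotR (w : List Int) : List Int := [PySem.List.pyGetD w 1 0, -(PySem.List.pyGetD w 0 0)]

theorem rotL_iter (k : Nat) (x y : Int) :
    rotL^[k] [x, y] =
      if k % 4 = 1 then [-y, x] else if k % 4 = 2 then [-x, -y]
      else if k % 4 = 3 then [y, -x] else [x, y] := by
  induction k generalizing x y with
  | zero => simp
  | succ k ih =>
    have hstep : rotL^[k+1] [x, y] = rotL^[k] [-y, x] := by
      rw [Function.iterate_succ_apply]
      simp [rotL, PySem.List.pyGetD]
    rw [hstep, ih]
    have h4 : k % 4 = 0 ∨ k % 4 = 1 ∨ k % 4 = 2 ∨ k % 4 = 3 := by omega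
    rcases h4 with h | h | h | h <;>
      · have h' : (k+1) % 4 = (k % 4 + 1) % 4 := by omega
        simp [h, h']

theorem rotR_iter (k : Nat) (x y : Int) :
    rotR^[k] [x, y] =
      if k % 4 = 1 then [y, -x] else if k % 4 = 2 then [-x, -y]
      else if k % 4 = 3 then [-y, x] else [x, y] := by
  induction k generalizing x y with
  | zero => simp
  | succ k ih =>
    have hstep : rotR^[k+1] [x, y] = rotR^[k] [y, -x] := by
      rw [Function.iterate_succ_apply]
      simp [rotR, PySem.List.pyGetD]
    rw [hstep, ih]
    have h4 : k % 4 = 0 ∨ k % 4 = 1 ∨ k % 4 = 2 ∨ k % 4 = 3 := by omega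
    rcases h4 with h | h | h | h <;>
      · have h' : (k+1) % 4 = (k % 4 + 1) % 4 := by omega
        simp [h, h']

-- the first rotation forgets everything but coordinates 0 and 1
theorem rot_start (f : List Int → List Int)
    (hf : ∀ w, f w = f [PySem.List.pyGetD w 0 0, PySem.List.pyGetD w 1 0])
    (k : Nat) (hk : 1 ≤ k) (wp : List Int) :
    f^[k] wp = f^[k] [PySem.List.pyGetD wp 0 0, PySem.List.pyGetD wp 1 0] := by
  obtain ⟨j, rfl⟩ : ∃ j, k = j + 1 := ⟨k - 1, by omega⟩
  rw [Function.iterate_succ_apply, Function.iterate_succ_apply, hf]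

theorem rotL_start (w : List Int) :
    rotL w = rotL [PySem.List.pyGetD w 0 0, PySem.List.pyGetD w 1 0] := by
  simp [rotL, PySem.List.pyGetD]

theorem rotR_start (w : List Int) :
    rotR w = rotR [PySem.List.pyGetD w 0 0, PySem.List.pyGetD w 1 0] := by
  simp [rotR, PySem.List.pyGetD]

theorem mod_toNat (n : Int) (hn : 1 ≤ n) :
    PySem.Int.mod n 4 = ((n.toNat % 4 : Nat) : Int) := by
  rw [PySem.Int.mod_eq_emod_of_pos (by norm_num)]
  omega

theorem rot_closed_L (wp : List Int) (n : Int) :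
    (PySem.List.pyRange 0 n 1).foldl
        (fun w _ => [-(PySem.List.pyGetD w 1 0), PySem.List.pyGetD w 0 0]) wp
      = (if 1 ≤ n then
          (let x := PySem.List.pyGetD wp 0 0
           let y := PySem.List.pyGetD wp 1 0
           let m := PySem.Int.mod n 4
           if m == 1 then [-y, x]
           else if m == 2 then [-x, -y]
           else if m == 3 then [y, -x]
           else [x, y])
        else wp) := by
  by_cases hn : 1 ≤ n
  · rw [if_pos hn]
    rw [show (fun (w : List Int) (_ : Int) => [-(PySem.List.pyGetD w 1 0), PySem.List.pyGetD w 0 0]) = (fun w _ => rotL w) from rfl]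
    rw [foldl_const_iterate, PySem.List.length_pyRange_one]
    have hk : 1 ≤ (n - 0).toNat := by omega
    rw [rot_start rotL rotL_start _ hk wp, rotL_iter, mod_toNat n hn]
    have hn0 : (n - 0).toNat = n.toNat := by omega
    rw [hn0]
    have h4 : n.toNat % 4 = 0 ∨ n.toNat % 4 = 1 ∨ n.toNat % 4 = 2 ∨ n.toNat % 4 = 3 := by omega
    rcases h4 with h | h | h | h <;> simp [h]
  · rw [if_neg hn, PySem.List.pyRange_one_eq_nil (by omega)]
    rfl

theorem rot_closed_R (wp : List Int) (n : Int) :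
    (PySem.List.pyRange 0 n 1).foldl
        (fun w _ => [PySem.List.pyGetD w 1 0, -(PySem.List.pyGetD w 0 0)]) wp
      = (if 1 ≤ n then
          (let x := PySem.List.pyGetD wp 0 0
           let y := PySem.List.pyGetD wp 1 0
           let m := PySem.Int.mod (-(PySem.Int.mod n 4)) 4
           if m == 1 then [-y, x]
           else if m == 2 then [-x, -y]
           else if m == 3 then [y, -x]
           else [x, y])
        else wp) := by
  by_cases hn : 1 ≤ n
  · rw [if_pos hn]
    rw [show (fun (w : List Int) (_ : Int) => [PySem.List.pyGetD w 1 0, -(PySem.List.pyGetD w 0 0)]) = (fun w _ => rotR w) from rfl]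
    rw [foldl_const_iterate, PySem.List.length_pyRange_one]
    have hk : 1 ≤ (n - 0).toNat := by omega
    rw [rot_start rotR rotR_start _ hk wp, rotR_iter, mod_toNat n hn]
    have hn0 : (n - 0).toNat = n.toNat := by omega
    rw [hn0]
    have h4 : n.toNat % 4 = 0 ∨ n.toNat % 4 = 1 ∨ n.toNat % 4 = 2 ∨ n.toNat % 4 = 3 := by omega
    rcases h4 with h | h | h | h <;> simp [h, PySem.Int.mod]
  · rw [if_neg hn, PySem.List.pyRange_one_eq_nil (by omega)]
    rfl

-- ===== VERDICT (by name: the statement is the Claim_ definition above) =====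
theorem move_waypoint_spec : Claim_equal_move_waypoint := by
  intro wp action dist _ hpre
  unfold Spec_move_waypoint move_waypoint move_waypoint_alt
  by_cases hN : action = "N"
  · simp [hN]
  by_cases hS : action = "S"
  · simp [hS, sub_eq_add_neg]
  by_cases hW : action = "W"
  · simp [hW, sub_eq_add_neg]
  by_cases hE : action = "E"
  · simp [hE]
  by_cases hL : action = "L"
  · subst hL
    simpa using rot_closed_L wp (PySem.Int.floordiv dist 90)
  by_cases hR : action = "R"
  · subst hR
    simpa using rot_closed_R wp (PySem.Int.floordiv dist 90)
  · simp [hN, hS, hW, hE, hL, hR]
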